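-- pv_equiv track=rewrite | github.com/mendersoftware/mantra | scripts/add-nightly-pipelines.py | remove_entries_from_nightlies_js
-- ===== SOURCE A (Python) =====
-- def remove_entries_from_nightlies_js(content, version):
--     """Strip out all nightlies.js entries for a retired release branch
--
--     Matches on the ':{version}' pattern in the name field and removes the
--     whole object block so the UI stops showing pipelines we no longer run
--     """
--     lines = content.split("\n")
--     result_lines = []
--     skip_until_close = False
--     i = 0
--
--     while i < len(lines):
--         line = lines[i]
--
--         if not skip_until_close and f":{version}'" in line and "name:" in line:
--             while result_lines and result_lines[-1].strip() in ("{", ""):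
--                 result_lines.pop()
--             skip_until_close = True
--             i += 1
--             continue
--
--         if skip_until_close:
--             if line.strip() in ("},", "}"):
--                 skip_until_close = False
--             i += 1
--             continue
--
--         result_lines.append(line)
--         i += 1
--
--     return "\n".join(result_lines)
-- ===== SOURCE B (Python) =====
-- def remove_entries_from_nightlies_js(content, version):
--     """Strip out all nightlies.js entries for a retired release branch.
--
--     One forward pass with a deferred-commit buffer: lines whose strip() is
--     '{' or '' are buffered instead of emitted, so a matching name line simply
--     drops the buffer (no popping from the output).  The output list is
--     append-only.
--     """
--     pattern = f":{version}'"
--     out = []       # committed lines, never removed again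
--     pending = []   # trailing run of lines whose strip() is '{' or ''
--     skipping = False
--     for line in content.split("\n"):
--         if skipping:
--             if line.strip() in ("},", "}"):
--                 skipping = False
--         elif pattern in line and "name:" in line:
--             pending = []
--             skipping = True
--         elif line.strip() in ("{", ""):
--             pending.append(line)
--         else:
--             out.extend(pending)
--             pending = []
--             out.append(line)
--     out.extend(pending)
--     return "\n".join(out)
-- ===== Notes on version B (the rewrite author's own statement) =====
-- stated objective: simpler
-- what changed: Replaces A's backtracking (popping '{'/blank lines back off the growing result list at each match) by an append-only pass that buffers trailing '{'/blank lines in a pending list and either commits or discards the buffer, so the output is never mutated after being emitted.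
import Mathlib
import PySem

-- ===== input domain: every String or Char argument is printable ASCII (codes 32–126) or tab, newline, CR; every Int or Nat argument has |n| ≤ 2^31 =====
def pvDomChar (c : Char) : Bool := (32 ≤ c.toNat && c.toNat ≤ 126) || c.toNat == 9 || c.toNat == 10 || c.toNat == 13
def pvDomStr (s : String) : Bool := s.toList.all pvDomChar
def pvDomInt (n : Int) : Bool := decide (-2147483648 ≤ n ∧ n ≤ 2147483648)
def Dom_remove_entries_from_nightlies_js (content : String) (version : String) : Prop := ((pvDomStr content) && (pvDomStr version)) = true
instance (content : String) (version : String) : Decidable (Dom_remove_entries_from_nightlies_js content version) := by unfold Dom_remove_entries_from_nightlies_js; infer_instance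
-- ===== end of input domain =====

-- B replaces A's pop-from-the-result backtracking by an append-only output with a
-- deferred-commit buffer (objective: simpler one-directional pass; same cost).

-- ===== PORT A =====

-- `line.strip() in ("{", "")`
def pvPoppable (l : String) : Bool := PySem.Str.strip l == "{" || PySem.Str.strip l == ""

-- `while result_lines and result_lines[-1].strip() in ("{", ""): result_lines.pop()`
-- (popping from the end = dropping from the head of the reversed list, step for step)
def pvPopRev : List String → List String
  | [] => []
  | l :: ls => if pvPoppable l then pvPopRev ls else l :: ls

def pvPop (res : List String) : List String := (pvPopRev res.reverse).reverse

-- the `while i < len(lines)` loop of A over the remaining lines, state = (result_lines, skip_until_close)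
def pvALoop (pat : String) : List String → List String → Bool → List String
  | [], res, _ => res
  | l :: ls, res, skip =>
    if !skip && PySem.Str.isIn pat l && PySem.Str.isIn "name:" l then
      pvALoop pat ls (pvPop res) true
    else if skip then
      if PySem.Str.strip l == "}," || PySem.Str.strip l == "}" then pvALoop pat ls res false
      else pvALoop pat ls res true
    else
      pvALoop pat ls (res ++ [l]) skip

def remove_entries_from_nightlies_js (content : String) (version : String) : String :=
  PySem.Str.join "\n" (pvALoop (":" ++ version ++ "'") ((PySem.Str.split? content "\n").getD []) [] false)

-- ===== PORT B =====

-- B's single forward pass, state = (out committed lines, pending buffer, skipping flag)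
def pvBLoop (pat : String) : List String → List String → List String → Bool → List String
  | [], out, pending, _ => out ++ pending
  | l :: ls, out, pending, skipping =>
    if skipping then
      if PySem.Str.strip l == "}," || PySem.Str.strip l == "}" then pvBLoop pat ls out pending false
      else pvBLoop pat ls out pending true
    else if PySem.Str.isIn pat l && PySem.Str.isIn "name:" l then
      pvBLoop pat ls out [] true
    else if PySem.Str.strip l == "{" || PySem.Str.strip l == "" then
      pvBLoop pat ls out (pending ++ [l]) false
    else
      pvBLoop pat ls (out ++ pending ++ [l]) [] false

def remove_entries_from_nightlies_js_alt (content : String) (version : String) : String :=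
  PySem.Str.join "\n" (pvBLoop (":" ++ version ++ "'") ((PySem.Str.split? content "\n").getD []) [] [] false)

-- ===== PRECONDITION & SPEC =====
def Spec_remove_entries_from_nightlies_js (content : String) (version : String) (out : String) : Prop := out = remove_entries_from_nightlies_js_alt content version
instance (content : String) (version : String) (out : String) : Decidable (Spec_remove_entries_from_nightlies_js content version out) := by unfold Spec_remove_entries_from_nightlies_js; infer_instance

-- ===== CLAIM (what is proved, stated in full; the proofs are below) =====
def Claim_equal_remove_entries_from_nightlies_js : Prop := ∀ (content : String) (version : String), Dom_remove_entries_from_nightlies_js content version → Spec_remove_entries_from_nightlies_js content version (remove_entries_from_nightlies_js content version)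

-- ===== LEMMAS AND PROOFS =====

-- "the committed output never ends in a poppable line"
def pvOk (out : List String) : Prop := ∀ l, out.getLast? = some l → pvPoppable l = false

theorem pvOk_nil : pvOk [] := by intro l h; simp at h

theorem pvOk_concat (out : List String) (l : String) (h : pvPoppable l = false) :
    pvOk (out ++ [l]) := by
  intro m hm
  simp [List.getLast?_append] at hm
  rwa [hm] at h

theorem pvPopRev_append (rp ro : List String) (h : ∀ l ∈ rp, pvPoppable l = true) :
    pvPopRev (rp ++ ro) = pvPopRev ro := by
  induction rp with
  | nil => rfl
  | cons a t ih =>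
    simp only [List.cons_append, pvPopRev, h a (by simp)]
    exact ih (fun l hl => h l (by simp [hl]))

theorem pvPop_eq (out pending : List String)
    (hp : ∀ l ∈ pending, pvPoppable l = true) (ho : pvOk out) :
    pvPop (out ++ pending) = out := by
  unfold pvPop
  rw [List.reverse_append, pvPopRev_append _ _ (fun l hl => hp l (by simpa using hl))]
  cases h : out.reverse with
  | nil =>
    have : out = [] := by simpa using congrArg List.reverse h
    subst this; rfl
  | cons a t =>
    have ha : out.getLast? = some a := by
      rw [List.getLast?_eq_head?_reverse, h]; rfl
    simp [pvPopRev, ho a ha, ← h]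

theorem pvLoop_eq (pat : String) (ls : List String) :
    ∀ out pending skip,
      (∀ l ∈ pending, pvPoppable l = true) → pvOk out →
      pvALoop pat ls (out ++ pending) skip = pvBLoop pat ls out pending skip := by
  induction ls with
  | nil => intro out pending skip _ _; rfl
  | cons l ls ih =>
    intro out pending skip hp ho
    by_cases hs : skip = true
    · subst hs
      simp only [pvALoop, pvBLoop, Bool.not_true, Bool.false_and, Bool.false_eq_true,
        reduceIte]
      split
      · exact ih out pending false hp ho
      · exact ih out pending true hp ho
    · have hs' : skip = false := by simpa using hs
      subst hs'
      by_cases hm : (PySem.Str.isIn pat l && PySem.Str.isIn "name:" l) = true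
      · simp only [pvALoop, pvBLoop, Bool.not_false, Bool.true_and, hm,
          Bool.false_eq_true, reduceIte]
        rw [pvPop_eq out pending hp ho]
        simpa using ih out [] true (by simp) ho
      · have hm' : (PySem.Str.isIn pat l && PySem.Str.isIn "name:" l) = false := by
          simpa using hm
        simp only [pvALoop, pvBLoop, Bool.not_false, Bool.true_and, hm',
          Bool.false_eq_true, reduceIte]
        by_cases hpop : pvPoppable l = true
        · have hc : (PySem.Str.strip l == "{" || PySem.Str.strip l == "") = true := hpop
          rw [if_pos hc, List.append_assoc]
          exact ih out (pending ++ [l]) false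
            (by intro m hmm; rcases List.mem_append.1 hmm with h | h
                · exact hp m h
                · simp at h; subst h; exact hpop) ho
        · have hpop' : pvPoppable l = false := by simpa using hpop
          have hc : (PySem.Str.strip l == "{" || PySem.Str.strip l == "") = false := hpop'
          rw [if_neg (by simp [hc])]
          have := ih (out ++ pending ++ [l]) [] false (by simp)
            (pvOk_concat (out ++ pending) l hpop')
          simpa [List.append_assoc] using this

-- ===== VERDICT (by name: the statement is the Claim_ definition above) =====
theorem remove_entries_from_nightlies_js_spec : Claim_equal_remove_entries_from_nightlies_js := by
  intro content version _
  show _ = _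
  unfold remove_entries_from_nightlies_js remove_entries_from_nightlies_js_alt
  exact congrArg (PySem.Str.join "\n") (pvLoop_eq _ _ [] [] false (by simp) pvOk_nil)
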